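-- pv_equiv track=rewrite | github.com/daniel-reich/turbo-robot | bWNZ3y98NwZRKk5rj_10.py | block_player
-- ===== SOURCE A (Python) =====
-- def block_player(a, b):
--   i = [[0,1,2],[3,4,5],[6,7,8]]
--   for x in range(9):
--     y = sorted([x,a,b])
--     if (y[2]-y[1]) == (y[1]-y[0]):
--       if (y[1]-y[0]) == 2:
--         if y[1] != 4:
--           pass
--         else:
--           return x
--       else:
--         return x
--     else:
--       pass
-- ===== SOURCE B (Python) =====
-- def block_player(a, b):
--     # Closed-form: any x completing an AP with a,b must be 2a-b, 2b-a, or (a+b)//2 (even sum).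
--     def ok(x):
--         s = sorted([x, a, b])
--         return s[2] - s[1] == s[1] - s[0] and not (s[1] - s[0] == 2 and s[1] != 4)
--     cands = [2 * a - b, 2 * b - a]
--     if (a + b) % 2 == 0:
--         cands.append((a + b) // 2)
--     valid = [x for x in cands if 0 <= x <= 8 and ok(x)]
--     return min(valid) if valid else None
-- ===== Notes on version B (the rewrite author's own statement) =====
-- stated objective: faster
-- what changed: Replaces the scan over all 9 board cells with the three closed-form candidates that can complete an arithmetic progression with a and b (2a-b, 2b-a, and (a+b)//2 when a+b is even), filters them by the same acceptance test and returns the smallest.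
import Mathlib
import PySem

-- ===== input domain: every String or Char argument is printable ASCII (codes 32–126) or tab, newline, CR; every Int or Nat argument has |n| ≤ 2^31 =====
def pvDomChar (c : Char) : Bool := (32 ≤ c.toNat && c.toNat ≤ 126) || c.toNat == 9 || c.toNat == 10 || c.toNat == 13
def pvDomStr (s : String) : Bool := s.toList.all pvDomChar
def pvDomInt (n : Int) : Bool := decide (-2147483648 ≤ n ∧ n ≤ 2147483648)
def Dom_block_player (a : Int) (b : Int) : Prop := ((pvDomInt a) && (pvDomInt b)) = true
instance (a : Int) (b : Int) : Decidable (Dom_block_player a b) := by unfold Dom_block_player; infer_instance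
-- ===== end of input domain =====

-- B replaces A's scan over all 9 cells with the three closed-form AP-completing candidates
-- (2a-b, 2b-a, (a+b)//2 when a+b is even), filtered by the same acceptance test; the smallest is returned.

-- ===== PORT A =====
-- the loop 'for x in range(9): … return x / pass'; early return = stopping the recursion
def blockLoopA (a : Int) (b : Int) : List Int → Option Int
  | [] => none
  | x :: rest =>
    let y := PySem.List.sorted [x, a, b] (fun v => v) false
    -- y has length 3, so indices 0,1,2 are in range (Python cannot raise here)
    let y0 := PySem.List.pyGetD y 0 0
    let y1 := PySem.List.pyGetD y 1 0
    let y2 := PySem.List.pyGetD y 2 0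
    if y2 - y1 = y1 - y0 then
      if y1 - y0 = 2 then
        if y1 ≠ 4 then blockLoopA a b rest
        else some x
      else some x
    else blockLoopA a b rest

def block_player (a : Int) (b : Int) : Option Int :=
  let _i : List (List Int) := [[0,1,2],[3,4,5],[6,7,8]]  -- unused in A too
  blockLoopA a b (PySem.List.pyRange 0 9 1)

-- ===== PORT B =====
def okB (a : Int) (b : Int) (x : Int) : Bool :=
  let s := PySem.List.sorted [x, a, b] (fun v => v) false
  let s0 := PySem.List.pyGetD s 0 0
  let s1 := PySem.List.pyGetD s 1 0
  let s2 := PySem.List.pyGetD s 2 0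
  (s2 - s1 == s1 - s0) && !((s1 - s0 == 2) && (s1 != 4))

def block_player_alt (a : Int) (b : Int) : Option Int :=
  let cands : List Int :=
    [2 * a - b, 2 * b - a] ++
      (if PySem.Int.mod (a + b) 2 = 0 then [PySem.Int.floordiv (a + b) 2] else [])
  let valid := cands.filter (fun x => decide (0 ≤ x) && decide (x ≤ 8) && okB a b x)
  PySem.List.min? valid (fun x => x)

-- ===== PRECONDITION & SPEC =====
def Spec_block_player (a : Int) (b : Int) (out : Option Int) : Prop := out = block_player_alt a b
instance (a : Int) (b : Int) (out : Option Int) : Decidable (Spec_block_player a b out) := by unfold Spec_block_player; infer_instance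

-- ===== CLAIM (what is proved, stated in full; the proofs are below) =====
def Claim_equal_block_player : Prop := ∀ (a : Int) (b : Int), Dom_block_player a b → Spec_block_player a b (block_player a b)

-- ===== LEMMAS AND PROOFS =====

-- A's nested-if body accepts x exactly when okB does
theorem blockLoopA_cons (a b x : Int) (rest : List Int) :
    blockLoopA a b (x :: rest) = if okB a b x then some x else blockLoopA a b rest := by
  simp only [blockLoopA, okB]
  split_ifs with h1 h2 h3 <;> simp_all

-- A's loop is find? with the shared test
theorem blockLoopA_eq_find? (a b : Int) (l : List Int) :
    blockLoopA a b l = l.find? (okB a b) := by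
  induction l with
  | nil => rfl
  | cons x rest ih =>
    rw [blockLoopA_cons, List.find?_cons]
    by_cases h : okB a b x = true <;> simp [h, ih]

-- sorted [x,a,b] is a 3-element nondecreasing permutation of [x,a,b]
theorem sorted3_shape (x a b : Int) :
    ∃ s0 s1 s2, PySem.List.sorted [x, a, b] (fun v => v) false = [s0, s1, s2] ∧
      s0 ≤ s1 ∧ s1 ≤ s2 ∧ s0 + s1 + s2 = x + a + b ∧ (s1 = x ∨ s1 = a ∨ s1 = b) := by
  have hperm := PySem.List.sorted_perm [x, a, b] (fun v => v) false
  have hlen : (PySem.List.sorted [x, a, b] (fun v => v) false).length = 3 := by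
    simp [hperm.length_eq]
  have hpw := PySem.List.sorted_pairwise [x, a, b] (fun v => v)
  match hs : PySem.List.sorted [x, a, b] (fun v => v) false, hlen with
  | [s0, s1, s2], _ =>
    rw [hs] at hperm hpw
    refine ⟨s0, s1, s2, rfl, ?_, ?_, ?_, ?_⟩
    · exact (List.pairwise_cons.mp hpw).1 s1 (by simp)
    · exact (List.pairwise_cons.mp (List.pairwise_cons.mp hpw).2).1 s2 (by simp)
    · have h := hperm.sum_eq; simp at h; linarith
    · have : s1 ∈ [x, a, b] := hperm.mem_iff.mp (by simp)
      simpa using this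

-- an accepted x is one of B's closed-form candidates
theorem okB_candidate (a b x : Int) (h : okB a b x = true) :
    x = 2 * a - b ∨ x = 2 * b - a ∨
      (PySem.Int.mod (a + b) 2 = 0 ∧ x = PySem.Int.floordiv (a + b) 2) := by
  obtain ⟨s0, s1, s2, hs, h01, h12, hsum, hmem⟩ := sorted3_shape x a b
  unfold okB at h
  rw [hs] at h
  simp [pysem] at h
  have hap : s2 - s1 = s1 - s0 := h.1
  rcases hmem with h1 | h1 | h1
  · refine Or.inr (Or.inr ⟨?_, ?_⟩)
    · exact (PySem.Int.mod_eq_zero_iff_dvd (a + b) 2).mpr ⟨x, by omega⟩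
    · have := (PySem.Int.floordiv_eq_iff_of_pos (a := a + b) (b := 2) (q := x)
        (by norm_num)).mpr ⟨by omega, by omega⟩
      omega
  · exact Or.inl (by omega)
  · exact Or.inr (Or.inl (by omega))

-- on a strictly increasing list, the found element is the least satisfying one
theorem find?_min_of_pairwise_lt (p : Int → Bool) (l : List Int) (m : Int)
    (hpw : l.Pairwise (· < ·)) (hf : l.find? p = some m) :
    ∀ x ∈ l, p x = true → m ≤ x := by
  induction l with
  | nil => simp at hf
  | cons y t ih =>
    rw [List.pairwise_cons] at hpw
    by_cases hy : p y = true
    · simp only [List.find?_cons_of_pos hy] at hf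
      obtain rfl : y = m := by simpa using hf
      intro x hx _
      rcases List.mem_cons.mp hx with rfl | hx
      · exact le_refl x
      · exact le_of_lt (hpw.1 x hx)
    · simp only [List.find?_cons_of_neg (by simpa using hy)] at hf
      intro x hx hpx
      rcases List.mem_cons.mp hx with rfl | hx
      · exact absurd hpx hy
      · exact ih hpw.2 hf x hx hpx

-- ===== VERDICT (by name: the statement is the Claim_ definition above) =====
theorem block_player_spec : Claim_equal_block_player := by
  intro a b _
  unfold Spec_block_player block_player block_player_alt
  rw [blockLoopA_eq_find?]
  show (PySem.List.pyRange 0 9 1).find? (okB a b) =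
    PySem.List.min?
      (([2 * a - b, 2 * b - a] ++
          (if PySem.Int.mod (a + b) 2 = 0 then [PySem.Int.floordiv (a + b) 2] else [])).filter
        (fun x => decide (0 ≤ x) && decide (x ≤ 8) && okB a b x)) (fun x => x)
  set cands : List Int :=
    [2 * a - b, 2 * b - a] ++
      (if PySem.Int.mod (a + b) 2 = 0 then [PySem.Int.floordiv (a + b) 2] else []) with hcands
  set valid := cands.filter (fun x => decide (0 ≤ x) && decide (x ≤ 8) && okB a b x) with hvalid
  -- every element of valid is in range and accepted
  have hvalid_mem : ∀ v ∈ valid, (0 ≤ v ∧ v ≤ 8) ∧ okB a b v = true := by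
    intro v hv
    have h := (List.mem_filter.mp hv).2
    simp only [Bool.and_eq_true, decide_eq_true_eq] at h
    exact ⟨⟨h.1.1, h.1.2⟩, h.2⟩
  cases hf : (PySem.List.pyRange 0 9 1).find? (okB a b) with
  | none =>
    have hnone : ∀ x ∈ PySem.List.pyRange 0 9 1, ¬ okB a b x = true := by
      simpa using List.find?_eq_none.mp hf
    have hnil : valid = [] := by
      rw [List.eq_nil_iff_forall_not_mem]
      intro v hv
      obtain ⟨⟨hv0, hv8⟩, hok⟩ := hvalid_mem v hv
      exact hnone v ((PySem.List.mem_pyRange_one).mpr ⟨hv0, by omega⟩) hok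
    rw [hnil]
    rfl
  | some m =>
    have hok : okB a b m = true := List.find?_some hf
    have hmR : m ∈ PySem.List.pyRange 0 9 1 := List.mem_of_find?_eq_some hf
    have hm09 : 0 ≤ m ∧ m < 9 := (PySem.List.mem_pyRange_one).mp hmR
    have hmc : m ∈ cands := by
      rcases okB_candidate a b m hok with h1 | h1 | ⟨h1, h2⟩
      · rw [hcands]; simp [h1]
      · rw [hcands]; simp [h1]
      · rw [hcands]; rw [if_pos h1]; simp [h2]
    have hmv : m ∈ valid := by
      rw [hvalid]
      refine List.mem_filter.mpr ⟨hmc, ?_⟩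
      simp only [Bool.and_eq_true, decide_eq_true_eq]
      exact ⟨⟨hm09.1, by omega⟩, hok⟩
    have hmin : ∀ v ∈ valid, m ≤ v := by
      intro v hv
      obtain ⟨⟨hv0, hv8⟩, hokv⟩ := hvalid_mem v hv
      exact find?_min_of_pairwise_lt (okB a b) _ m
        (PySem.List.pairwise_lt_pyRange_one 0 9) hf v
        ((PySem.List.mem_pyRange_one).mpr ⟨hv0, by omega⟩) hokv
    cases hmn : PySem.List.min? valid (fun x => x) with
    | none =>
      have hnil := (PySem.List.min?_eq_none_iff valid (fun x => x)).mp hmn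
      rw [hnil] at hmv
      simp at hmv
    | some m' =>
      have hm'v : m' ∈ valid := PySem.List.min?_mem hmn
      have h1 : m' ≤ m := PySem.List.min?_isMin hmn m hmv
      have h2 : m ≤ m' := hmin m' hm'v
      have : m = m' := le_antisymm h2 h1
      rw [this]
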